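-- pv_equiv track=rewrite | github.com/phongdz-cloud/Python | Lesson6/Bai16.py | solution
-- ===== SOURCE A (Python) =====
-- def solution(n, lst):
--     positiveNumber = -1
--     for i in range(0, n):
--         if lst[i] > 0:
--             positiveNumber = lst[i]
--     if positiveNumber != -1:
--         return positiveNumber
--     return -1
-- ===== SOURCE B (Python) =====
-- def solution(n, lst):
--     for i in range(n - 1, -1, -1):
--         if lst[i] > 0:
--             return lst[i]
--     return -1
-- ===== Notes on version B (the rewrite author's own statement) =====
-- stated objective: idiomatic
-- what changed: Replaces A's forward full scan keeping the last positive in an accumulator by a backward short-circuiting search that returns the first positive from the right.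
import Mathlib
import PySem

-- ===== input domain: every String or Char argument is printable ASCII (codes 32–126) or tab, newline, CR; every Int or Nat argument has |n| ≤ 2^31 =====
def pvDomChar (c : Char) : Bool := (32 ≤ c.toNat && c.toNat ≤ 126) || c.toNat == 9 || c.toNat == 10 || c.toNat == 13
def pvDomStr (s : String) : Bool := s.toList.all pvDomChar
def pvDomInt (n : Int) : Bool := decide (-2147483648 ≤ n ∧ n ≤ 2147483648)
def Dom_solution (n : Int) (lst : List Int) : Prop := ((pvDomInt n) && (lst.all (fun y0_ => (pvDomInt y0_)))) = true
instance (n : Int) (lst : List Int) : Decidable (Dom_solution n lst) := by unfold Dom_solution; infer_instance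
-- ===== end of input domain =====

-- B searches backward and returns the first positive from the right (short-circuit) instead of A's forward scan with accumulator.


-- ===== PORT A =====
-- forward loop over range(0, n); keeps the last positive lst[i] in the accumulator
def solution (n : Int) (lst : List Int) : Int :=
  let positiveNumber :=
    (PySem.List.pyRange 0 n 1).foldl
      (fun acc i =>
        if (PySem.List.pyGet? lst i).getD 0 > 0 then (PySem.List.pyGet? lst i).getD 0 else acc)
      (-1)
  if positiveNumber ≠ -1 then positiveNumber else -1

-- ===== PORT B =====
-- backward loop over range(n-1, -1, -1); returns on the first positive found
def solAltGo (lst : List Int) : List Int → Int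
  | [] => -1
  | i :: rest =>
    if (PySem.List.pyGet? lst i).getD 0 > 0 then (PySem.List.pyGet? lst i).getD 0
    else solAltGo lst rest

def solution_alt (n : Int) (lst : List Int) : Int :=
  solAltGo lst (PySem.List.pyRange (n - 1) (-1) (-1))

-- ===== PRECONDITION & SPEC =====
-- Pre_ excludes n > len(lst), where A raises IndexError.
def Pre_solution (n : Int) (lst : List Int) : Prop := n ≤ (lst.length : Int)
instance (n : Int) (lst : List Int) : Decidable (Pre_solution n lst) := by unfold Pre_solution; infer_instance
def pvWitness_solution : Int × List Int := (3, [1, -2, 5])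

def Spec_solution (n : Int) (lst : List Int) (out : Int) : Prop := out = solution_alt n lst
instance (n : Int) (lst : List Int) (out : Int) : Decidable (Spec_solution n lst out) := by unfold Spec_solution; infer_instance

-- ===== CLAIM (what is proved, stated in full; the proofs are below) =====
def Claim_equal_solution : Prop := ∀ (n : Int) (lst : List Int), Dom_solution n lst → Pre_solution n lst → Spec_solution n lst (solution n lst)

-- ===== LEMMAS AND PROOFS =====

-- backward first-positive over the reversed index list = forward fold keeping the last positive
theorem solAltGo_reverse (lst : List Int) (is : List Int) :
    solAltGo lst is.reverse =
      is.foldl (fun acc i =>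
        if (PySem.List.pyGet? lst i).getD 0 > 0 then (PySem.List.pyGet? lst i).getD 0 else acc) (-1) := by
  induction is using List.reverseRecOn with
  | nil => simp [solAltGo]
  | append_singleton is i ih =>
    simp only [List.reverse_append, List.reverse_singleton, List.singleton_append,
      List.foldl_append, List.foldl_cons, List.foldl_nil, solAltGo]
    split
    · rfl
    · exact ih

theorem solution_eq_foldl (n : Int) (lst : List Int) :
    solution n lst =
      (PySem.List.pyRange 0 n 1).foldl
        (fun acc i =>
          if (PySem.List.pyGet? lst i).getD 0 > 0 then (PySem.List.pyGet? lst i).getD 0 else acc)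
        (-1) := by
  unfold solution
  simp only []
  split <;> omega

-- ===== VERDICT (by name: the statement is the Claim_ definition above) =====
theorem solution_spec : Claim_equal_solution := by
  intro n lst _ _
  unfold Spec_solution solution_alt
  have hr : PySem.List.pyRange (n - 1) (-1) (-1) = (PySem.List.pyRange 0 n 1).reverse := by
    rw [PySem.List.pyRange_neg_one_eq_reverse]
    norm_num
  rw [hr, solAltGo_reverse, solution_eq_foldl]
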